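-- pv_equiv track=rewrite | github.com/LuizBrunca/Bible-CLI | biblia-cli.py | ler_biblia_em_livros_capitulos_e_versos
-- ===== SOURCE A (Python) =====
-- def ler_biblia_em_livros_capitulos_e_versos(biblia):
--     livros = []
--     livro_atual = None
--     capitulo_atual = []
--
--     for linha in biblia:
--         linha = linha.rstrip()
--
--         if not linha or linha == 'NOVO TESTAMENTO':
--             continue
--
--         if linha[0].isalpha():
--             if livro_atual is not None:
--                 if capitulo_atual:
--                     livro_atual.append(capitulo_atual)
--                 livros.append(livro_atual)
--
--             livro_atual = []
--             capitulo_atual = []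
--
--         elif linha.startswith(' '):
--             if capitulo_atual:
--                 livro_atual.append(capitulo_atual)
--             capitulo_atual = []
--
--         elif linha[0].isdigit():
--             capitulo_atual.append(linha.strip())
--
--     if capitulo_atual:
--         livro_atual.append(capitulo_atual)
--     if livro_atual:
--         livros.append(livro_atual)
--
--     return livros
-- ===== SOURCE B (Python) =====
-- def _tokenize(biblia):
--     toks = []
--     for linha in biblia:
--         l = linha.rstrip()
--         if not l or l == 'NOVO TESTAMENTO':
--             continue
--         if l[0].isalpha():
--             toks.append(('B', ''))
--         elif l[0] == ' ':
--             toks.append(('C', ''))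
--         elif l[0].isdigit():
--             toks.append(('V', l.strip()))
--     return toks
--
--
-- def _split_on(items, tag):
--     parts = [[]]
--     for it in items:
--         if it[0] == tag:
--             parts.append([])
--         else:
--             parts[-1].append(it)
--     return parts
--
--
-- def ler_biblia_em_livros_capitulos_e_versos(biblia):
--     # Tokenize once, then build the nesting by splitting the token stream on
--     # book/chapter markers (instead of one stateful accumulator loop).
--     toks = _tokenize(biblia)
--     segments = _split_on(toks, 'B')[1:]  # tokens before the first book belong to no book
--     books = [
--         [ch for ch in [[v[1] for v in run] for run in _split_on(seg, 'C')] if ch]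
--         for seg in segments
--     ]
--     if books and not books[-1]:
--         books.pop()  # a trailing book with no chapters is not emitted
--     return books
-- ===== Notes on version B (the rewrite author's own statement) =====
-- stated objective: alternative
-- what changed: A builds the nesting in one stateful loop over lines (current book/chapter accumulators with flush logic); B first tokenizes each line into book/chapter/verse tokens, then splits the token stream on book markers and each segment on chapter markers, filtering empty chapters and a trailing empty book.
import Mathlib
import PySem

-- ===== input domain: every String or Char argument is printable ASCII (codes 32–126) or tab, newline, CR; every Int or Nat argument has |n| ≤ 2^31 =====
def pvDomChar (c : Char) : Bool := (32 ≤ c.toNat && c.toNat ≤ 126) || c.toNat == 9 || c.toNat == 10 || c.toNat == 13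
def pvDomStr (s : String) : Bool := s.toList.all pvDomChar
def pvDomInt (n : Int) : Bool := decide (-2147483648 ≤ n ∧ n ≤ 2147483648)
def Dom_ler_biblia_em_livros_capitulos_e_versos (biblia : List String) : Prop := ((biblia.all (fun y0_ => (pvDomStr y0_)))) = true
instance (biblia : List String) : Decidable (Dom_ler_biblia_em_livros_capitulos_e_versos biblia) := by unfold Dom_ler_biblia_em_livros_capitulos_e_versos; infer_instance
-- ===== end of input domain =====

-- B re-decomposes the parse as tokenize-then-split (split the token stream on book
-- and chapter markers) instead of A's one stateful accumulator loop; objective: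
-- alternative decomposition (not faster); return value only (neither mutates input).

-- ===== PORT A =====
-- state: (livros, livro_atual : Option, capitulo_atual); on inputs excluded by
-- Pre_ the Python raises AttributeError (append to None) — there the port keeps
-- livro_atual = None instead (unreachable under Pre_).
-- A's loop body, named (st = (livros, livro_atual, capitulo_atual))
def lerStep (st : List (List (List String)) × Option (List (List String)) × List String)
    (linha : String) : List (List (List String)) × Option (List (List String)) × List String :=
  let (livros, livro?, cap) := st
  let l := PySem.Str.rstrip linha
  if l = "" ∨ l = "NOVO TESTAMENTO" then st
  else
    match PySem.Str.pyGet? l 0 with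
    | none => st  -- unreachable: l ≠ ""
    | some c =>
      if PySem.Chars.isalpha c then
        ((match livro? with
          | some lv => livros ++ [if cap ≠ [] then lv ++ [cap] else lv]
          | none => livros), some [], [])
      else if PySem.Str.startswith l " " then
        (livros, if cap ≠ [] then livro?.map (fun lv => lv ++ [cap]) else livro?, [])
      else if PySem.Chars.isdigit c then
        (livros, livro?, cap ++ [PySem.Str.strip l])
      else st

def ler_biblia_em_livros_capitulos_e_versos (biblia : List String) : List (List (List String)) :=
  let fin := biblia.foldl lerStep ([], none, [])
  let (livros, livro?, cap) := fin
  let livro? := if cap ≠ [] then livro?.map (fun lv => lv ++ [cap]) else livro?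
  match livro? with
  | some lv => if lv ≠ [] then livros ++ [lv] else livros
  | none => livros

-- ===== PORT B =====
inductive Tok where
  | book : Tok
  | chap : Tok
  | verse : String → Tok
deriving DecidableEq, Repr

def Tok.isBook : Tok → Bool | .book => true | _ => false
def Tok.isChap : Tok → Bool | .chap => true | _ => false
def Tok.text : Tok → String | .verse s => s | _ => ""

-- one line → at most one tagged token (B's first pass)
def pvClassify (linha : String) : Option Tok :=
  let l := PySem.Str.rstrip linha
  if l = "" ∨ l = "NOVO TESTAMENTO" then none
  else
    match PySem.Str.pyGet? l 0 with
    | none => none  -- unreachable: l ≠ ""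
    | some c =>
      if PySem.Chars.isalpha c then some .book
      else if c = ' ' then some .chap
      else if PySem.Chars.isdigit c then some (.verse (PySem.Str.strip l))
      else none

-- Source B's split_on: parts = [[]]; sep starts a new part, anything else joins the last
def pvSplitOn (isSep : Tok → Bool) (items : List Tok) : List (List Tok) :=
  items.foldl
    (fun parts it =>
      if isSep it then parts ++ [[]]
      else parts.dropLast ++ [parts.getLastD [] ++ [it]])
    [[]]

-- Source B's _tokenize loop
def pvTokenize (biblia : List String) : List Tok :=
  biblia.foldl
    (fun acc linha => match pvClassify linha with
      | some t => acc ++ [t]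
      | none => acc) []

def ler_biblia_em_livros_capitulos_e_versos_alt (biblia : List String) : List (List (List String)) :=
  let toks := pvTokenize biblia
  let segments := (pvSplitOn Tok.isBook toks).drop 1
  let books := segments.map (fun seg =>
    (((pvSplitOn Tok.isChap seg).map (fun run => run.map Tok.text)).filter (· ≠ [])))
  if books ≠ [] ∧ books.getLastD [] = [] then books.dropLast else books

-- ===== PRECONDITION & SPEC =====
-- Pre_ excludes exactly the inputs on which A raises AttributeError (append to a
-- None book): a verse line that precedes every book line and is flushed by a
-- chapter line, or any verse line when no book line exists at all.
-- line-kind predicates (first character class of the rstripped line), used only by Pre_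
def pvKindB (s : String) : Bool :=
  let l := PySem.Str.rstrip s
  if l = "" ∨ l = "NOVO TESTAMENTO" then false
  else
    match PySem.Str.pyGet? l 0 with
    | none => false
    | some c => PySem.Chars.isalpha c

def pvKindC (s : String) : Bool :=
  let l := PySem.Str.rstrip s
  if l = "" ∨ l = "NOVO TESTAMENTO" then false
  else
    match PySem.Str.pyGet? l 0 with
    | none => false
    | some c => !PySem.Chars.isalpha c && (c = ' ')

def pvKindV (s : String) : Bool :=
  let l := PySem.Str.rstrip s
  if l = "" ∨ l = "NOVO TESTAMENTO" then false
  else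
    match PySem.Str.pyGet? l 0 with
    | none => false
    | some c => !PySem.Chars.isalpha c && !(c = ' ') && PySem.Chars.isdigit c

def pvBad (biblia : List String) : Bool :=
  if biblia.any pvKindB then
    ((biblia.takeWhile (fun s => !pvKindB s)).dropWhile (fun s => !pvKindV s)).any pvKindC
  else biblia.any pvKindV

def Pre_ler_biblia_em_livros_capitulos_e_versos (biblia : List String) : Prop :=
  pvBad biblia = false
instance (biblia : List String) : Decidable (Pre_ler_biblia_em_livros_capitulos_e_versos biblia) := by
  unfold Pre_ler_biblia_em_livros_capitulos_e_versos; infer_instance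

def pvWitness_ler_biblia_em_livros_capitulos_e_versos : List String :=
  ["Genesis", " 1", "1 no principio", "2 e a terra", " 2", "3 disse Deus"]

def Spec_ler_biblia_em_livros_capitulos_e_versos (biblia : List String) (out : List (List (List String))) : Prop := out = ler_biblia_em_livros_capitulos_e_versos_alt biblia
instance (biblia : List String) (out : List (List (List String))) : Decidable (Spec_ler_biblia_em_livros_capitulos_e_versos biblia out) := by unfold Spec_ler_biblia_em_livros_capitulos_e_versos; infer_instance

-- ===== CLAIM (what is proved, stated in full; the proofs are below) =====
def Claim_equal_ler_biblia_em_livros_capitulos_e_versos : Prop := ∀ (biblia : List String), Dom_ler_biblia_em_livros_capitulos_e_versos biblia → Pre_ler_biblia_em_livros_capitulos_e_versos biblia → Spec_ler_biblia_em_livros_capitulos_e_versos biblia (ler_biblia_em_livros_capitulos_e_versos biblia)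

-- ===== LEMMAS AND PROOFS =====

def Tok.isVerse : Tok → Bool | .verse _ => true | _ => false

-- A's state and per-token step (proof-side reformulation of A's loop body)
abbrev PState := List (List (List String)) × Option (List (List String)) × List String

def closeCap (lv : List (List String)) (cap : List String) : List (List String) :=
  if cap ≠ [] then lv ++ [cap] else lv

def stepTok (st : PState) (t : Tok) : PState :=
  match t, st with
  | .book, (livros, livro?, cap) =>
      ((match livro? with
        | some lv => livros ++ [if cap ≠ [] then lv ++ [cap] else lv]
        | none => livros), some [], [])
  | .chap, (livros, livro?, cap) =>
      (livros, if cap ≠ [] then livro?.map (fun lv => lv ++ [cap]) else livro?, [])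
  | .verse s, (livros, livro?, cap) => (livros, livro?, cap ++ [s])

def finalize (st : PState) : List (List (List String)) :=
  let (livros, livro?, cap) := st
  let livro? := if cap ≠ [] then livro?.map (fun lv => lv ++ [cap]) else livro?
  match livro? with
  | some lv => if lv ≠ [] then livros ++ [lv] else livros
  | none => livros

-- left-recursive characterisation of split_on
def splitR (p : Tok → Bool) : List Tok → List (List Tok)
  | [] => [[]]
  | t :: ts =>
    if p t then [] :: splitR p ts
    else (t :: (splitR p ts).headD []) :: (splitR p ts).tail

-- reference recursion for A's loop once a book is open
def runA : List (List String) → List String → List Tok → List (List (List String))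
  | l, cap, [] => if closeCap l cap ≠ [] then [closeCap l cap] else []
  | l, cap, .verse s :: ts => runA l (cap ++ [s]) ts
  | l, cap, .chap :: ts => runA (closeCap l cap) [] ts
  | l, cap, .book :: ts => closeCap l cap :: runA [] [] ts

def chapStep : List (List String) × List String → Tok → List (List String) × List String
  | (l, cap), .verse s => (l, cap ++ [s])
  | (l, cap), .chap => (closeCap l cap, [])
  | (l, cap), .book => (l, cap)

def bookOf (l : List (List String)) (cap : List String) (seg : List Tok) : List (List String) :=
  closeCap (seg.foldl chapStep (l, cap)).1 (seg.foldl chapStep (l, cap)).2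

def postB (bs : List (List (List String)))
    : List (List (List String)) :=
  if bs ≠ [] ∧ bs.getLastD [] = [] then bs.dropLast else bs

theorem splitR_ne_nil (p : Tok → Bool) (ts : List Tok) : splitR p ts ≠ [] := by
  cases ts with
  | nil => simp [splitR]
  | cons t ts => simp only [splitR]; split <;> simp

theorem getLastD_eq (l : List (List Tok)) (h : l ≠ []) : l.getLastD [] = l.getLast h := by
  rw [List.getLastD_eq_getLast?, List.getLast?_eq_some_getLast h]; rfl

theorem foldl_split (p : Tok → Bool) (items : List Tok) (parts0 : List (List Tok)) (h : parts0 ≠ []) :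
    items.foldl (fun parts it =>
      if p it then parts ++ [[]]
      else parts.dropLast ++ [parts.getLastD [] ++ [it]]) parts0
    = parts0.dropLast ++ ((parts0.getLast h ++ (splitR p items).headD []) :: (splitR p items).tail) := by
  induction items generalizing parts0 with
  | nil =>
    conv_lhs => rw [← List.dropLast_concat_getLast h]
    simp [splitR]
  | cons t ts ih =>
    obtain ⟨hd, tl, hsp⟩ := List.exists_cons_of_ne_nil (splitR_ne_nil p ts)
    simp only [List.foldl_cons, splitR]
    by_cases hp : p t
    · rw [if_pos hp, if_pos hp, ih _ (by simp)]
      rw [List.getLast_append_singleton (l := parts0)]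
      simp only [hsp, List.dropLast_concat, List.headD_cons, List.tail_cons, List.nil_append]
      conv_lhs => rw [← List.dropLast_concat_getLast h]
      simp
    · rw [if_neg hp, if_neg hp, ih _ (by simp)]
      rw [List.getLast_append_singleton (l := parts0.dropLast), List.dropLast_concat,
          getLastD_eq parts0 h]
      simp [hsp]

theorem pvSplitOn_eq_splitR (p : Tok → Bool) (ts : List Tok) :
    pvSplitOn p ts = splitR p ts := by
  obtain ⟨hd, tl, hsp⟩ := List.exists_cons_of_ne_nil (splitR_ne_nil p ts)
  unfold pvSplitOn
  rw [foldl_split p ts [[]] (by simp)]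
  simp [hsp]

theorem pyGet0_cons (l : List Char) (c : Char) (h : PySem.List.pyGet? l 0 = some c) :
    ∃ t, l = c :: t := by
  cases l with
  | nil => simp [PySem.List.pyGet?, PySem.List.pyIdx?] at h
  | cons a t =>
    have ha : a = c := by simpa [PySem.List.pyGet?, PySem.List.pyIdx?] using h
    exact ⟨t, by rw [ha]⟩

theorem startswith_space_iff (t : List Char) (c : Char) :
    (PySem.Chars.startswith (c :: t) [' '] = true) ↔ c = ' ' := by
  rw [PySem.Chars.startswith_iff, List.cons_prefix_cons]
  simp only [List.nil_prefix, and_true]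
  exact eq_comm

theorem stepLine_eq (st : PState) (linha : String) :
    lerStep st linha
      = (match pvClassify linha with | none => st | some t => stepTok st t) := by
  obtain ⟨livros, livro?, cap⟩ := st
  unfold lerStep pvClassify
  by_cases h0 : PySem.Str.rstrip linha = "" ∨ PySem.Str.rstrip linha = "NOVO TESTAMENTO"
  · simp [h0]
  · simp only [h0, if_false]
    cases hg : PySem.Str.pyGet? (PySem.Str.rstrip linha) 0 with
    | none => simp [hg]
    | some c =>
      simp only [hg]
      have hg' : PySem.List.pyGet? (PySem.Chars.rstrip linha.toList) 0 = some c := by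
        simpa using hg
      obtain ⟨t, hl⟩ := pyGet0_cons _ c hg'
      simp only [PySem.Str.startswith_eq, PySem.Str.toList_rstrip, hl]
      simp only [show String.toList " " = [' '] from rfl]
      have hsw := startswith_space_iff t c
      split_ifs <;> cases livro? <;> simp_all [stepTok]

theorem foldA (l : List String) (init : PState) :
    l.foldl lerStep init = (l.filterMap pvClassify).foldl stepTok init := by
  induction l generalizing init with
  | nil => rfl
  | cons x xs ih =>
    rw [List.foldl_cons, stepLine_eq, List.filterMap_cons]
    cases h : pvClassify x with
    | none => simp only [h]; exact ih init
    | some t => simp only [h, List.foldl_cons]; exact ih (stepTok init t)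

theorem A_eq_finalize (biblia : List String) :
    ler_biblia_em_livros_capitulos_e_versos biblia
      = finalize ((biblia.filterMap pvClassify).foldl stepTok ([], none, [])) := by
  rw [← foldA]
  rfl

theorem runA_eq (ts : List Tok) (l : List (List String)) (cap : List String)
    (livros : List (List (List String))) :
    finalize (ts.foldl stepTok (livros, some l, cap)) = livros ++ runA l cap ts := by
  induction ts generalizing l cap livros with
  | nil =>
    by_cases hc : cap = [] <;> by_cases hl : l = [] <;>
      simp_all [finalize, runA, closeCap]
  | cons t ts ih =>
    cases t with
    | book =>
      simp only [List.foldl_cons, stepTok, runA, closeCap]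
      rw [ih]
      by_cases hc : cap = [] <;> simp [hc]
    | chap =>
      simp only [List.foldl_cons, stepTok, runA, closeCap]
      by_cases hc : cap = [] <;> simp [hc, ih]
    | verse s =>
      simp only [List.foldl_cons, stepTok, runA]
      exact ih _ _ _

theorem postB_cons (x : List (List String)) (bs : List (List (List String))) (h : bs ≠ []) :
    postB (x :: bs) = x :: postB bs := by
  obtain ⟨hd, tl, rfl⟩ := List.exists_cons_of_ne_nil h
  simp only [postB]
  by_cases hl : (hd :: tl).getLastD [] = [] <;>
    simp_all [List.getLastD_cons]

theorem splitR_no_sep (p : Tok → Bool) (ts : List Tok) (h : ∀ t ∈ ts, p t = false) :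
    splitR p ts = [ts] := by
  induction ts with
  | nil => rfl
  | cons t ts ih =>
    have ht := h t (by simp)
    rw [splitR, if_neg (by simp [ht]), ih (fun x hx => h x (by simp [hx]))]
    rfl

theorem splitR_append (p : Tok → Bool) (pre ts : List Tok) (h : ∀ t ∈ pre, p t = false) :
    splitR p (pre ++ ts) = (pre ++ (splitR p ts).headD []) :: (splitR p ts).tail := by
  induction pre with
  | nil =>
    obtain ⟨hd, tl, hsp⟩ := List.exists_cons_of_ne_nil (splitR_ne_nil p ts)
    simp [hsp]
  | cons t pre ih =>
    have ht := h t (by simp)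
    rw [List.cons_append, splitR, if_neg (by simp [ht]),
        ih (fun x hx => h x (by simp [hx]))]
    simp

theorem mem_splitR_no_sep (p : Tok → Bool) (ts : List Tok) (seg : List Tok)
    (h : seg ∈ splitR p ts) : ∀ t ∈ seg, p t = false := by
  induction ts generalizing seg with
  | nil => simp [splitR] at h; simp [h]
  | cons t ts ih =>
    obtain ⟨hd, tl, hsp⟩ := List.exists_cons_of_ne_nil (splitR_ne_nil p ts)
    rw [splitR] at h
    by_cases hp : p t
    · rw [if_pos hp] at h
      rcases List.mem_cons.mp h with h1 | h1
      · simp [h1]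
      · exact ih seg h1
    · rw [if_neg hp] at h
      rcases List.mem_cons.mp h with h1 | h1
      · subst h1
        intro x hx
        rcases List.mem_cons.mp hx with h2 | h2
        · simpa [h2] using hp
        · exact ih hd (by simp [hsp]) x (by simpa [hsp] using h2)
      · exact ih seg (by simp [hsp, List.mem_cons]; right; simpa [hsp] using h1)

theorem chapFold_eq (seg : List Tok) (h : ∀ t ∈ seg, Tok.isBook t = false)
    (l : List (List String)) (cap : List String) :
    closeCap (seg.foldl chapStep (l, cap)).1 (seg.foldl chapStep (l, cap)).2
      = l ++ ((cap ++ ((splitR Tok.isChap seg).map (fun run => run.map Tok.text)).headD [])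
          :: ((splitR Tok.isChap seg).map (fun run => run.map Tok.text)).tail).filter (· ≠ []) := by
  induction seg generalizing l cap with
  | nil => by_cases hc : cap = [] <;> simp [splitR, closeCap, hc]
  | cons t ts ih =>
    obtain ⟨hd, tl, hsp⟩ := List.exists_cons_of_ne_nil (splitR_ne_nil Tok.isChap ts)
    have hts : ∀ x ∈ ts, Tok.isBook x = false := fun x hx => h x (by simp [hx])
    cases t with
    | book =>
      have hb := h .book (by simp)
      simp [Tok.isBook] at hb
    | chap =>
      rw [List.foldl_cons, splitR, if_pos (show Tok.isChap .chap = true from rfl)]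
      rw [show chapStep (l, cap) .chap = (closeCap l cap, []) from rfl, ih hts]
      simp only [hsp, List.map_cons, List.headD_cons, List.tail_cons, List.nil_append,
        List.filter_cons, closeCap]
      by_cases hc : cap = [] <;> simp [hc]
    | verse s =>
      rw [List.foldl_cons, splitR, if_neg (show ¬ Tok.isChap (.verse s) = true by simp [Tok.isChap])]
      rw [show chapStep (l, cap) (.verse s) = (l, cap ++ [s]) from rfl, ih hts]
      simp [hsp, Tok.text]

theorem bookOf_eq_mkBook (seg : List Tok) (h : ∀ t ∈ seg, Tok.isBook t = false) :
    bookOf [] [] seg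
      = ((splitR Tok.isChap seg).map (fun run => run.map Tok.text)).filter (· ≠ []) := by
  obtain ⟨hd, tl, hsp⟩ := List.exists_cons_of_ne_nil (splitR_ne_nil Tok.isChap seg)
  unfold bookOf
  rw [chapFold_eq seg h [] []]
  simp [hsp]

theorem runA_eq_postB (ts : List Tok) (l : List (List String)) (cap : List String) :
    runA l cap ts
      = postB (bookOf l cap ((splitR Tok.isBook ts).headD [])
          :: ((splitR Tok.isBook ts).tail.map (bookOf [] []))) := by
  induction ts generalizing l cap with
  | nil =>
    simp only [splitR, List.headD_cons, List.tail_cons, List.map_nil, runA, postB, bookOf,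
      List.foldl_nil]
    by_cases hc : closeCap l cap = [] <;> simp [hc]
  | cons t ts ih =>
    obtain ⟨hd, tl, hsp⟩ := List.exists_cons_of_ne_nil (splitR_ne_nil Tok.isBook ts)
    cases t with
    | book =>
      rw [runA, splitR, if_pos (show Tok.isBook .book = true from rfl)]
      rw [ih [] [], hsp]
      simp only [List.headD_cons, List.tail_cons, List.map_cons]
      conv_rhs => rw [postB_cons _ _ (List.cons_ne_nil _ _)]
      simp [bookOf, closeCap]
    | chap =>
      rw [runA, splitR, if_neg (show ¬ Tok.isBook .chap = true by simp [Tok.isBook])]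
      rw [ih (closeCap l cap) [], hsp]
      simp [bookOf, List.foldl_cons, chapStep]
    | verse s =>
      rw [runA, splitR, if_neg (show ¬ Tok.isBook (.verse s) = true by simp [Tok.isBook])]
      rw [ih l (cap ++ [s]), hsp]
      simp [bookOf, List.foldl_cons, chapStep]

theorem verses_only_fold (ts : List Tok)
    (h : ∀ t ∈ ts, Tok.isBook t = false ∧ Tok.isChap t = false)
    (livros : List (List (List String))) (lv : Option (List (List String))) (cap : List String) :
    ts.foldl stepTok (livros, lv, cap) = (livros, lv, cap ++ ts.map Tok.text) := by
  induction ts generalizing cap with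
  | nil => simp
  | cons t ts ih =>
    cases t with
    | book =>
      have hb := (h .book (by simp)).1
      simp [Tok.isBook] at hb
    | chap =>
      have hb := (h .chap (by simp)).2
      simp [Tok.isChap] at hb
    | verse s =>
      rw [List.foldl_cons, stepTok, ih (fun x hx => h x (by simp [hx]))]
      simp [Tok.text]

theorem prefix_fold (pre : List Tok)
    (hb : ∀ t ∈ pre, Tok.isBook t = false)
    (hg : (pre.dropWhile fun t => !t.isVerse).any Tok.isChap = false) :
    ∃ cap, pre.foldl stepTok ([], none, []) = ([], none, cap) := by
  induction pre with
  | nil => exact ⟨[], rfl⟩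
  | cons t ts ih =>
    cases t with
    | book =>
      have hbb := hb .book (by simp)
      simp [Tok.isBook] at hbb
    | chap =>
      rw [List.foldl_cons, show stepTok ([], none, []) .chap = ([], none, []) from rfl]
      exact ih (fun x hx => hb x (by simp [hx])) (by simpa [List.dropWhile, Tok.isVerse] using hg)
    | verse s =>
      rw [List.foldl_cons, show stepTok ([], none, []) (.verse s) = ([], none, [s]) from rfl]
      rw [List.dropWhile_cons_of_neg (by simp [Tok.isVerse])] at hg
      simp only [List.any_cons, Bool.or_eq_false_iff] at hg
      refine ⟨[s] ++ ts.map Tok.text, verses_only_fold ts ?_ [] none [s]⟩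
      intro x hx
      refine ⟨hb x (by simp [hx]), ?_⟩
      cases x with
      | chap =>
        have hc : ts.any Tok.isChap = true := List.any_of_mem (p := Tok.isChap) hx rfl
        exact absurd hc (by simp [hg.2])
      | book => rfl
      | verse _ => rfl


theorem dropWhile_head_false (p : Tok → Bool) (l : List Tok) (b : Tok) (rest : List Tok)
    (h : l.dropWhile p = b :: rest) : p b = false := by
  induction l with
  | nil => simp at h
  | cons x xs ih =>
    rw [List.dropWhile_cons] at h
    by_cases hp : p x
    · exact ih (by simpa [hp] using h)
    · obtain ⟨h1, _⟩ := List.cons.injEq .. ▸ (by simpa [hp] using h : x :: xs = b :: rest)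
      simp_all

theorem chaps_fold (ts : List Tok)
    (h : ∀ t ∈ ts, Tok.isBook t = false ∧ Tok.isVerse t = false) :
    ts.foldl stepTok ([], none, []) = ([], none, []) := by
  induction ts with
  | nil => rfl
  | cons t ts ih =>
    cases t with
    | book =>
      have hb := (h .book (by simp)).1
      simp [Tok.isBook] at hb
    | verse s =>
      have hb := (h (.verse s) (by simp)).2
      simp [Tok.isVerse] at hb
    | chap =>
      rw [List.foldl_cons, show stepTok ([], none, []) .chap = ([], none, []) from rfl]
      exact ih (fun x hx => h x (by simp [hx]))

def mkBooks (toks : List Tok) : List (List (List String)) :=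
  postB (((splitR Tok.isBook toks).drop 1).map
    (fun seg => ((splitR Tok.isChap seg).map (fun run => run.map Tok.text)).filter (· ≠ [])))

theorem pvTokenize_eq (l : List String) : pvTokenize l = l.filterMap pvClassify := by
  suffices h : ∀ acc, l.foldl
      (fun acc linha => match pvClassify linha with
        | some t => acc ++ [t]
        | none => acc) acc = acc ++ l.filterMap pvClassify by
    simpa [pvTokenize] using h []
  induction l with
  | nil => simp
  | cons x xs ih =>
    intro acc
    simp only [List.foldl_cons, List.filterMap_cons]
    cases h : pvClassify x <;> simp [h, ih]

theorem B_eq (biblia : List String) :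
    ler_biblia_em_livros_capitulos_e_versos_alt biblia = mkBooks (biblia.filterMap pvClassify) := by
  unfold ler_biblia_em_livros_capitulos_e_versos_alt mkBooks postB
  rw [pvTokenize_eq]
  simp only [pvSplitOn_eq_splitR]


theorem kindB_eq (s : String) : pvKindB s = (pvClassify s).any Tok.isBook := by
  unfold pvKindB pvClassify
  by_cases h0 : PySem.Str.rstrip s = "" ∨ PySem.Str.rstrip s = "NOVO TESTAMENTO"
  · simp [h0]
  · simp only [h0, if_false]
    cases hg : PySem.Str.pyGet? (PySem.Str.rstrip s) 0 with
    | none => simp [hg]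
    | some c => simp only [hg]; split_ifs <;> simp_all [Tok.isBook]

theorem kindC_eq (s : String) : pvKindC s = (pvClassify s).any Tok.isChap := by
  unfold pvKindC pvClassify
  by_cases h0 : PySem.Str.rstrip s = "" ∨ PySem.Str.rstrip s = "NOVO TESTAMENTO"
  · simp [h0]
  · simp only [h0, if_false]
    cases hg : PySem.Str.pyGet? (PySem.Str.rstrip s) 0 with
    | none => simp [hg]
    | some c => simp only [hg]; split_ifs <;> simp_all [Tok.isChap]

theorem kindV_eq (s : String) : pvKindV s = (pvClassify s).any Tok.isVerse := by
  unfold pvKindV pvClassify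
  by_cases h0 : PySem.Str.rstrip s = "" ∨ PySem.Str.rstrip s = "NOVO TESTAMENTO"
  · simp [h0]
  · simp only [h0, if_false]
    cases hg : PySem.Str.pyGet? (PySem.Str.rstrip s) 0 with
    | none => simp [hg]
    | some c => simp only [hg]; split_ifs <;> simp_all [Tok.isVerse]

theorem anyB_eq (l : List String) : (l.filterMap pvClassify).any Tok.isBook = l.any pvKindB := by
  rw [List.any_filterMap]
  congr 1
  funext a
  exact (kindB_eq a).symm

theorem anyC_eq (l : List String) : (l.filterMap pvClassify).any Tok.isChap = l.any pvKindC := by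
  rw [List.any_filterMap]
  congr 1
  funext a
  exact (kindC_eq a).symm

theorem anyV_eq (l : List String) : (l.filterMap pvClassify).any Tok.isVerse = l.any pvKindV := by
  rw [List.any_filterMap]
  congr 1
  funext a
  exact (kindV_eq a).symm

theorem takeB_eq (l : List String) :
    (l.filterMap pvClassify).takeWhile (fun t => !t.isBook)
      = (l.takeWhile (fun s => !pvKindB s)).filterMap pvClassify := by
  induction l with
  | nil => rfl
  | cons x xs ih =>
    rw [List.filterMap_cons, List.takeWhile_cons]
    cases hg : pvClassify x with
    | none =>
      have hkf : pvKindB x = false := by rw [kindB_eq, hg]; rfl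
      simp [hkf, hg, ih]
    | some t =>
      have hk := kindB_eq x
      rw [hg] at hk
      cases t <;> simp_all [Tok.isBook, List.takeWhile_cons, List.filterMap_cons]

theorem dropV_eq (m : List String) :
    (m.filterMap pvClassify).dropWhile (fun t => !t.isVerse)
      = (m.dropWhile (fun s => !pvKindV s)).filterMap pvClassify := by
  induction m with
  | nil => rfl
  | cons x xs ih =>
    rw [List.filterMap_cons, List.dropWhile_cons]
    cases hg : pvClassify x with
    | none =>
      have hkf : pvKindV x = false := by rw [kindV_eq, hg]; rfl
      simp [hkf, hg, ih]
    | some t =>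
      have hk := kindV_eq x
      rw [hg] at hk
      cases t <;> simp_all [Tok.isVerse, List.dropWhile_cons, List.filterMap_cons]

-- ===== VERDICT (by name: the statement is the Claim_ definition above) =====
theorem ler_biblia_em_livros_capitulos_e_versos_spec : Claim_equal_ler_biblia_em_livros_capitulos_e_versos := by
  intro biblia _ hpre
  unfold Spec_ler_biblia_em_livros_capitulos_e_versos
  unfold Pre_ler_biblia_em_livros_capitulos_e_versos pvBad at hpre
  rw [A_eq_finalize, B_eq]
  by_cases hbook : (biblia.filterMap pvClassify).any Tok.isBook
  · rw [if_pos (show biblia.any pvKindB = true by rw [← anyB_eq]; exact hbook)] at hpre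
    replace hpre : (((biblia.filterMap pvClassify).takeWhile (fun t => !t.isBook)).dropWhile
        (fun t => !t.isVerse)).any Tok.isChap = false := by
      rw [takeB_eq, dropV_eq, anyC_eq]
      exact hpre
    have hne : (biblia.filterMap pvClassify).dropWhile (fun t => !t.isBook) ≠ [] := by
      intro hnil
      obtain ⟨x, hx, hpx⟩ := List.any_eq_true.mp hbook
      have hxx := List.dropWhile_eq_nil_iff.mp hnil x hx
      simp [hpx] at hxx
    obtain ⟨b, rest, hdrop⟩ := List.exists_cons_of_ne_nil hne
    have hbB : b = .book := by
      have hb := dropWhile_head_false _ _ _ _ hdrop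
      cases b <;> simp_all [Tok.isBook]
    have hsplit : biblia.filterMap pvClassify
        = ((biblia.filterMap pvClassify).takeWhile (fun t => !t.isBook)) ++ Tok.book :: rest := by
      conv_lhs => rw [← List.takeWhile_append_dropWhile
        (p := fun t => !t.isBook) (l := biblia.filterMap pvClassify)]
      rw [hdrop, hbB]
    have hprefree : ∀ t ∈ (biblia.filterMap pvClassify).takeWhile (fun t => !t.isBook),
        Tok.isBook t = false := by
      intro t ht
      have := List.mem_takeWhile_imp ht
      simpa using this
    obtain ⟨cap0, hfold⟩ := prefix_fold _ hprefree hpre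
    obtain ⟨hd, tl, hsp⟩ := List.exists_cons_of_ne_nil (splitR_ne_nil Tok.isBook rest)
    -- A side
    rw [hsplit, List.foldl_append, hfold, List.foldl_cons,
        show stepTok ([], none, cap0) .book = ([], some [], []) from rfl,
        runA_eq rest [] [] [], List.nil_append, runA_eq_postB, hsp]
    simp only [List.headD_cons, List.tail_cons]
    -- B side
    unfold mkBooks
    rw [splitR_append _ _ _ hprefree,
        show splitR Tok.isBook (Tok.book :: rest) = [] :: splitR Tok.isBook rest by
          rw [splitR, if_pos (show Tok.isBook .book = true from rfl)]]
    simp only [List.headD_cons, List.tail_cons, List.drop_one, hsp, List.map_cons]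
    have hnosep : ∀ seg ∈ hd :: tl, ∀ t ∈ seg, Tok.isBook t = false :=
      fun seg hseg => mem_splitR_no_sep Tok.isBook rest seg (hsp ▸ hseg)
    rw [← bookOf_eq_mkBook hd (hnosep hd (by simp)),
        List.map_congr_left (l := tl)
          (f := fun seg => ((splitR Tok.isChap seg).map (fun run => run.map Tok.text)).filter (· ≠ []))
          (g := bookOf [] [])
          (fun seg hseg => bookOf_eq_mkBook seg (hnosep seg (by simp [hseg])) |>.symm)]
  · rw [if_neg (show ¬ biblia.any pvKindB = true by rw [← anyB_eq]; exact hbook)] at hpre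
    replace hpre : (biblia.filterMap pvClassify).any Tok.isVerse = false := by
      rw [anyV_eq]
      exact hpre
    have hnb : ∀ t ∈ biblia.filterMap pvClassify, Tok.isBook t = false := by
      intro t ht
      cases hpt : t.isBook
      · rfl
      · exact absurd (List.any_of_mem ht hpt) (by simp [hbook])
    have hall : ∀ t ∈ biblia.filterMap pvClassify,
        Tok.isBook t = false ∧ Tok.isVerse t = false := by
      intro t ht
      refine ⟨hnb t ht, ?_⟩
      cases hpt : t.isVerse
      · rfl
      · exact absurd (List.any_of_mem ht hpt) (by simp [hpre])
    rw [chaps_fold _ hall]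
    unfold mkBooks
    rw [splitR_no_sep _ _ hnb]
    rfl
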